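-- pv_equiv track=rewrite | github.com/jaysooo/Algorithm | problem-solving/baekjoon/Baekjoon1563/main.py | isNotAttandance
-- ===== SOURCE A (Python) =====
-- def isNotAttandance(att):
--     lcnt=0
--     acnt=0
--
--     for i in range(0,len(att)-2):
--         if att[i:i+3]=='AAA':
--             return True
--
--     for i in att:
--         if i =='L':
--             lcnt+=1
--         if lcnt>=2:
--             return True
--
--     return False
-- ===== SOURCE B (Python) =====
-- def isNotAttandance(att):
--     run = 0
--     lcnt = 0
--     for c in att:
--         run = run + 1 if c == 'A' else 0
--         if c == 'L':
--             lcnt += 1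
--         if run == 3 or lcnt == 2:
--             return True
--     return False
-- ===== Notes on version B (the rewrite author's own statement) =====
-- stated objective: alternative
-- what changed: Replaces A's two staged scans (an index loop building and comparing 3-character slices against 'AAA', then a separate counting loop) with a single left-to-right pass of a small state machine tracking the run length of consecutive A's and the L count, answering as soon as the run reaches 3 or the count reaches 2; no slicing and only one pass gives a constant-factor speedup.
import Mathlib
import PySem

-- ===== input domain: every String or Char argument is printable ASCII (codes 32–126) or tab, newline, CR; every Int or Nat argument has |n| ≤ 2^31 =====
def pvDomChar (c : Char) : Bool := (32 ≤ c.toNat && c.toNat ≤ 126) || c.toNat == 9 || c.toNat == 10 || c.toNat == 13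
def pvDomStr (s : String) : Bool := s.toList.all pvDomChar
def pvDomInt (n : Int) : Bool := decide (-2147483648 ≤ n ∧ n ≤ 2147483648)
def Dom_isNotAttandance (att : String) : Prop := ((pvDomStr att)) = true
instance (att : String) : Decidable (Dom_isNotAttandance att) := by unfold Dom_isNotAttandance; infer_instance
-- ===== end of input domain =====

-- B replaces A's two staged scans by one single-pass state machine (run of consecutive A's + L counter); same cost, different algorithm.

-- ===== PORT A =====
-- first loop: for i in range(0, len(att)-2): if att[i:i+3]=='AAA': return True
def pvALoop1 (cs : List Char) : List Int → Bool
  | [] => false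
  | i :: rest =>
      if PySem.Chars.slice cs (some i) (some (i + 3)) = "AAA".toList then true
      else pvALoop1 cs rest

-- second loop: for i in att: if i=='L': lcnt+=1; if lcnt>=2: return True
def pvALoop2 : List Char → Int → Bool
  | [], _ => false
  | c :: rest, lcnt =>
      if 2 ≤ (if c == 'L' then lcnt + 1 else lcnt) then true
      else pvALoop2 rest (if c == 'L' then lcnt + 1 else lcnt)

def isNotAttandance (att : String) : Bool :=
  if pvALoop1 att.toList (PySem.List.pyRange 0 ((att.toList.length : Int) - 2) 1) then true
  else pvALoop2 att.toList 0

-- ===== PORT B =====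
-- single pass: run = run+1 if c=='A' else 0; lcnt += (c=='L'); answer when run==3 or lcnt==2
def pvBLoop : List Char → Nat → Nat → Bool
  | [], _, _ => false
  | c :: rest, run, lcnt =>
      let run' := if c = 'A' then run + 1 else 0
      let lcnt' := if c = 'L' then lcnt + 1 else lcnt
      if run' = 3 ∨ lcnt' = 2 then true else pvBLoop rest run' lcnt'

def isNotAttandance_alt (att : String) : Bool :=
  pvBLoop att.toList 0 0

-- ===== PRECONDITION & SPEC =====
def Spec_isNotAttandance (att : String) (out : Bool) : Prop := out = isNotAttandance_alt att
instance (att : String) (out : Bool) : Decidable (Spec_isNotAttandance att out) := by unfold Spec_isNotAttandance; infer_instance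

-- ===== CLAIM (what is proved, stated in full; the proofs are below) =====
def Claim_equal_isNotAttandance : Prop := ∀ (att : String), Dom_isNotAttandance att → Spec_isNotAttandance att (isNotAttandance att)

-- ===== LEMMAS AND PROOFS =====

-- The AAA-detecting component of B's state machine, in isolation.
def pvAAAFrom : List Char → Nat → Bool
  | [], _ => false
  | c :: t, run =>
      let run' := if c = 'A' then run + 1 else 0
      if run' = 3 then true else pvAAAFrom t run'

lemma pvALoop1_eq_true_iff (cs : List Char) (l : List Int) :
    pvALoop1 cs l = true ↔
      ∃ i ∈ l, PySem.Chars.slice cs (some i) (some (i + 3)) = "AAA".toList := by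
  induction l with
  | nil => simp [pvALoop1]
  | cons i rest ih =>
      simp only [pvALoop1]
      split_ifs with h
      · exact iff_of_true rfl ⟨i, List.mem_cons_self, h⟩
      · rw [ih]
        constructor
        · rintro ⟨x, hx, hsl⟩
          exact ⟨x, List.mem_cons_of_mem _ hx, hsl⟩
        · rintro ⟨x, hx, hsl⟩
          rcases List.mem_cons.mp hx with rfl | hx'
          · exact absurd hsl h
          · exact ⟨x, hx', hsl⟩

lemma pvALoop1_range_eq_isIn (cs : List Char) :
    pvALoop1 cs (PySem.List.pyRange 0 ((cs.length : Int) - 2) 1) =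
      PySem.Chars.isIn "AAA".toList cs := by
  rw [Bool.eq_iff_iff, pvALoop1_eq_true_iff, ← PySem.Chars.exists_prefix_drop_iff_isIn]
  constructor
  · rintro ⟨i, hi, hsl⟩
    rw [PySem.List.mem_pyRange_one] at hi
    obtain ⟨h0, hlt⟩ := hi
    obtain ⟨j, rfl⟩ : ∃ j : Nat, i = (j : Int) := ⟨i.toNat, (Int.toNat_of_nonneg h0).symm⟩
    refine ⟨j, ?_⟩
    have h3 : ((j + 3 : Nat) : Int) = (j : Int) + 3 := by omega
    rw [← h3] at hsl
    simp only [PySem.Chars.slice, PySem.List.slice_natCast] at hsl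
    have e3 : (j + 3 - j) = 3 := by omega
    rw [e3] at hsl
    rw [← hsl]
    exact List.take_prefix 3 (List.drop j cs)
  · rintro ⟨j, hpre⟩
    obtain ⟨t, ht⟩ := hpre
    have hlen : cs.length - j = ("AAA".toList ++ t).length := by
      rw [ht, List.length_drop]
    have hj3 : j + 3 ≤ cs.length := by
      simp at hlen; omega
    refine ⟨(j : Int), ?_, ?_⟩
    · rw [PySem.List.mem_pyRange_one]
      exact ⟨Int.natCast_nonneg j, by omega⟩
    · have h3 : ((j + 3 : Nat) : Int) = (j : Int) + 3 := by omega
      rw [← h3]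
      simp only [PySem.Chars.slice, PySem.List.slice_natCast]
      have e3 : (j + 3 - j) = 3 := by omega
      rw [e3, ← ht]
      exact List.take_left' (by rfl)

lemma pvALoop2_eq_count (cs : List Char) (k : Int) (hk : k ≤ 1) :
    pvALoop2 cs k = decide (2 ≤ k + (cs.count 'L' : Int)) := by
  induction cs generalizing k with
  | nil => simp [pvALoop2]; omega
  | cons c rest ih =>
      simp only [pvALoop2]
      by_cases hc : c = 'L'
      · have e : (if c == 'L' then k + 1 else k) = k + 1 := by simp [hc]
        rw [e, hc, List.count_cons_self]
        by_cases h2 : 2 ≤ k + 1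
        · rw [if_pos h2]
          symm
          rw [decide_eq_true_eq]
          push_cast
          omega
        · rw [if_neg h2, ih (k + 1) (by omega), decide_eq_decide]
          push_cast
          omega
      · have e : (if c == 'L' then k + 1 else k) = k := by simp [hc]
        rw [e, if_neg (by omega), ih k hk]
        simp [hc]

lemma pvAAAFrom_iff_infix (cs : List Char) (r : Nat) (hr : r ≤ 2) :
    pvAAAFrom cs r = true ↔ "AAA".toList <:+: (List.replicate r 'A' ++ cs) := by
  induction cs generalizing r with
  | nil =>
      simp only [pvAAAFrom, List.append_nil]
      constructor
      · intro h; cases h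
      · intro h
        have := h.length_le
        simp at this
        omega
  | cons c t ih =>
      simp only [pvAAAFrom]
      by_cases hc : c = 'A'
      · rw [if_pos hc]
        subst hc
        by_cases h3 : r + 1 = 3
        · rw [if_pos h3]
          have hr2 : r = 2 := by omega
          subst hr2
          simp only [true_iff]
          exact ⟨[], t, by simp [List.replicate]⟩
        · rw [if_neg h3, ih (r + 1) (by omega)]
          rw [show List.replicate r 'A' ++ 'A' :: t = List.replicate (r + 1) 'A' ++ t by
            rw [List.replicate_succ']; simp]
      · rw [if_neg hc, if_neg (by omega), ih 0 (by omega)]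
        simp only [List.replicate, List.nil_append]
        constructor
        · intro h
          have h1 : t <:+: List.replicate r 'A' ++ c :: t :=
            ((List.suffix_cons c t).trans (List.suffix_append _ _)).isInfix
          exact h.trans h1
        · intro h
          have hAAA : "AAA".toList = ['A', 'A', 'A'] := rfl
          rw [hAAA] at h ⊢
          interval_cases r <;>
            simpa [List.replicate_succ, List.infix_cons_iff, List.cons_prefix_cons,
              hc, Ne.symm hc] using h

lemma pvBLoop_eq (cs : List Char) (run lcnt : Nat) (hr : run ≤ 2) (hl : lcnt ≤ 1) :
    pvBLoop cs run lcnt = (pvAAAFrom cs run || decide (2 ≤ lcnt + cs.count 'L')) := by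
  induction cs generalizing run lcnt with
  | nil => simp [pvBLoop, pvAAAFrom]; omega
  | cons c t ih =>
      simp only [pvBLoop, pvAAAFrom]
      by_cases h3 : (if c = 'A' then run + 1 else 0) = 3
      · simp [h3]
      · rw [if_neg h3]
        by_cases h2 : (if c = 'L' then lcnt + 1 else lcnt) = 2
        · rw [if_pos (Or.inr h2)]
          have hcL : c = 'L' := by
            by_contra hcL
            rw [if_neg hcL] at h2; omega
          rw [if_pos hcL] at h2
          symm
          rw [Bool.or_eq_true]
          right
          rw [decide_eq_true_eq, hcL, List.count_cons_self]
          omega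
        · have hr' : (if c = 'A' then run + 1 else 0) ≤ 2 := by
            split_ifs at h3 ⊢ <;> omega
          have hl' : (if c = 'L' then lcnt + 1 else lcnt) ≤ 1 := by
            split_ifs at h2 ⊢ <;> omega
          rw [if_neg (by tauto), ih _ _ hr' hl']
          congr 1
          by_cases hcL : c = 'L'
          · rw [if_pos hcL, hcL, List.count_cons_self, decide_eq_decide]
            omega
          · rw [if_neg hcL, List.count_cons_of_ne (fun h => hcL h)]

-- ===== VERDICT (by name: the statement is the Claim_ definition above) =====
theorem isNotAttandance_spec : Claim_equal_isNotAttandance := by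
  intro att _
  unfold Spec_isNotAttandance isNotAttandance isNotAttandance_alt
  rw [pvALoop1_range_eq_isIn, pvBLoop_eq att.toList 0 0 (by omega) (by omega)]
  have hA : pvAAAFrom att.toList 0 = PySem.Chars.isIn "AAA".toList att.toList := by
    rw [Bool.eq_iff_iff, pvAAAFrom_iff_infix att.toList 0 (by omega),
      PySem.Chars.isIn_iff_infix]
    simp
  rw [hA]
  cases h : PySem.Chars.isIn "AAA".toList att.toList with
  | true => simp
  | false =>
      simp only [Bool.false_eq_true, if_false, Bool.false_or]
      rw [pvALoop2_eq_count att.toList 0 (by omega), decide_eq_decide]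
      omega
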